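/- GENERATED by farm/mkstatement.py from design/units.tsv (unit `DGifSetupDecompress.P`) and the assertions of Gif/Spec/Seg_DGifSetupDecompress.lean — do not edit.
   THE STATEMENT of the proof unit `DGifSetupDecompress.P`: segment P of `DGifSetupDecompress` (15 instructions; entries 0x106180;
   exits 0x1061c8; ranges 0x106180-0x1061c8)
   takes each of its entry assertions to one of its exit assertions (`Gif.Spec.DGifSetupDecompress.SegP`), given the contracts of its callees.
   What the names mean: ProgX/Base/Spec/Basic.lean (the shared hypotheses), Gif/Spec/Seg_DGifSetupDecompress.lean (the assertions). The theorem to prove: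
   `theorem DGifSetupDecompress_P_ok : Gif.Spec.DGifSetupDecompress_P.Statement`. -/
import Gif.Code
import Gif.Dec.All
import Gif.Labels
import Gif.Spec.Seg_DGifSetupDecompress
namespace Gif.Spec.DGifSetupDecompress_P
open X86 X86.User Asan

/-- The statement of unit `DGifSetupDecompress.P`. -/
def Statement : Prop :=
  ∀ (Lay : Layout) (_hLay : Lay.hi = 0x1000000) (μ : Microarch) (_hμ : UserX.MicroOK μ) (u₀ : State)
    (_hcode : HasCodeNat Lay u₀ Gif.L.DGifSetupDecompress.entry Gif.Code.code_DGifSetupDecompress.nat Gif.L.DGifSetupDecompress.size),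
    Gif.Spec.DGifSetupDecompress.SegP Lay μ u₀

end Gif.Spec.DGifSetupDecompress_P
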